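-- pv_equiv track=rewrite | github.com/TakaIshikawa/blueprint | src/blueprint/task_schema_migration_readiness.py | _required_safeguards
-- ===== SOURCE A (Python) =====
-- from typing import Any, Iterable, Literal, Mapping, TypeVar
--
-- SchemaMigrationSignal = Literal[
--     "migration",
--     "schema_change",
--     "table_creation",
--     "column_rename",
--     "backfill",
--     "index_creation",
--     "foreign_key",
--     "constraint",
--     "data_migration",
-- ]
--
-- SchemaMigrationSafeguard = Literal[
--     "backwards_compatible_rollout",
--     "expand_contract_steps",
--     "backfill_plan",
--     "lock_timeout",
--     "rollback_strategy",
--     "migration_test",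
--     "production_volume_check",
--     "monitoring",
-- ]
--
-- _T = TypeVar("_T")
--
-- _SAFEGUARD_ORDER: tuple[SchemaMigrationSafeguard, ...] = (
--     "backwards_compatible_rollout",
--     "expand_contract_steps",
--     "backfill_plan",
--     "lock_timeout",
--     "rollback_strategy",
--     "migration_test",
--     "production_volume_check",
--     "monitoring",
-- )
--
-- def _required_safeguards(signals: tuple[SchemaMigrationSignal, ...]) -> tuple[SchemaMigrationSafeguard, ...]:
--     required: list[SchemaMigrationSafeguard] = [
--         "backwards_compatible_rollout",
--         "rollback_strategy",
--         "migration_test",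
--         "production_volume_check",
--         "monitoring",
--     ]
--     if any(signal in signals for signal in ("schema_change", "column_rename", "foreign_key", "constraint", "data_migration")):
--         required.append("expand_contract_steps")
--     if any(signal in signals for signal in ("backfill", "data_migration", "column_rename")):
--         required.append("backfill_plan")
--     if any(signal in signals for signal in ("schema_change", "table_creation", "index_creation", "foreign_key", "constraint")):
--         required.append("lock_timeout")
--     return tuple(_ordered_dedupe(required, _SAFEGUARD_ORDER))
--
-- def _ordered_dedupe(items: Iterable[_T], order: tuple[_T, ...]) -> list[_T]:
--     seen = set(items)
--     return [item for item in order if item in seen]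
-- ===== SOURCE B (Python) =====
-- _SAFEGUARD_ORDER = (
--     "backwards_compatible_rollout",
--     "expand_contract_steps",
--     "backfill_plan",
--     "lock_timeout",
--     "rollback_strategy",
--     "migration_test",
--     "production_volume_check",
--     "monitoring",
-- )
--
-- _TRIGGERS = {
--     "schema_change": ("expand_contract_steps", "lock_timeout"),
--     "column_rename": ("expand_contract_steps", "backfill_plan"),
--     "data_migration": ("expand_contract_steps", "backfill_plan"),
--     "foreign_key": ("expand_contract_steps", "lock_timeout"),
--     "constraint": ("expand_contract_steps", "lock_timeout"),
--     "backfill": ("backfill_plan",),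
--     "table_creation": ("lock_timeout",),
--     "index_creation": ("lock_timeout",),
-- }
--
-- def _required_safeguards(signals):
--     result = {
--         "backwards_compatible_rollout",
--         "rollback_strategy",
--         "migration_test",
--         "production_volume_check",
--         "monitoring",
--     }
--     for sig in signals:
--         result.update(_TRIGGERS.get(sig, ()))
--     return tuple(s for s in _SAFEGUARD_ORDER if s in result)
-- ===== Notes on version B (the rewrite author's own statement) =====
-- stated objective: idiomatic
-- what changed: Replaced A's three hard-coded any() membership scans plus a set-then-reorder dedupe with an inverted signal-to-safeguards lookup table folded over the input in a single pass, then one ordered filter over _SAFEGUARD_ORDER.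
import Mathlib
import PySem

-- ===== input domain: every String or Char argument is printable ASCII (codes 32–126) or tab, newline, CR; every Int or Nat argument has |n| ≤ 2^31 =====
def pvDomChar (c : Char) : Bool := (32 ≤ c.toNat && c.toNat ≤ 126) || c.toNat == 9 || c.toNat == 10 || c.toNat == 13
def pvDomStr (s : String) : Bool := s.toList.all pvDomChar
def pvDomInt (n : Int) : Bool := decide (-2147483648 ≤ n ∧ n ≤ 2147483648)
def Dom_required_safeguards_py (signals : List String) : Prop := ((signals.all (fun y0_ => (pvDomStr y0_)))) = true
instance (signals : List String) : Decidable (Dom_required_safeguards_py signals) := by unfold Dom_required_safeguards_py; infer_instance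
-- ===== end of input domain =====

-- B replaces A's three any() predicate scans by a signal→safeguards lookup table folded over
-- the input in one pass (objective: idiomatic/alternative decomposition; same asymptotic cost).

-- ===== PORT A =====
def pvSafeguardOrder : List String :=
  ["backwards_compatible_rollout", "expand_contract_steps", "backfill_plan", "lock_timeout",
   "rollback_strategy", "migration_test", "production_volume_check", "monitoring"]

def pvOrderedDedupe (items : List String) (order : List String) : List String :=
  let seen : PySem.Set String := PySem.Set.ofList items
  order.filter (fun item => seen.contains item)

def required_safeguards_py (signals : List String) : List String :=
  let required : List String :=
    ["backwards_compatible_rollout", "rollback_strategy", "migration_test",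
     "production_volume_check", "monitoring"]
  let required :=
    if ["schema_change", "column_rename", "foreign_key", "constraint", "data_migration"].any
        (fun signal => signals.contains signal)
    then required ++ ["expand_contract_steps"] else required
  let required :=
    if ["backfill", "data_migration", "column_rename"].any
        (fun signal => signals.contains signal)
    then required ++ ["backfill_plan"] else required
  let required :=
    if ["schema_change", "table_creation", "index_creation", "foreign_key", "constraint"].any
        (fun signal => signals.contains signal)
    then required ++ ["lock_timeout"] else required
  pvOrderedDedupe required pvSafeguardOrder

-- ===== PORT B =====
def pvTriggers (sig : String) : List String :=
  if sig == "schema_change" then ["expand_contract_steps", "lock_timeout"]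
  else if sig == "column_rename" then ["expand_contract_steps", "backfill_plan"]
  else if sig == "data_migration" then ["expand_contract_steps", "backfill_plan"]
  else if sig == "foreign_key" then ["expand_contract_steps", "lock_timeout"]
  else if sig == "constraint" then ["expand_contract_steps", "lock_timeout"]
  else if sig == "backfill" then ["backfill_plan"]
  else if sig == "table_creation" then ["lock_timeout"]
  else if sig == "index_creation" then ["lock_timeout"]
  else []

def required_safeguards_py_alt (signals : List String) : List String :=
  let result : PySem.Set String :=
    PySem.Set.ofList ["backwards_compatible_rollout", "rollback_strategy", "migration_test",
                      "production_volume_check", "monitoring"]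
  let result := signals.foldl (fun acc sig => PySem.Set.update acc (pvTriggers sig)) result
  pvSafeguardOrder.filter (fun s => result.contains s)

-- ===== PRECONDITION & SPEC =====
def Spec_required_safeguards_py (signals : List String) (out : List String) : Prop := out = required_safeguards_py_alt signals
instance (signals : List String) (out : List String) : Decidable (Spec_required_safeguards_py signals out) := by unfold Spec_required_safeguards_py; infer_instance

-- ===== CLAIM (what is proved, stated in full; the proofs are below) =====
def Claim_equal_required_safeguards_py : Prop := ∀ (signals : List String), Dom_required_safeguards_py signals → Spec_required_safeguards_py signals (required_safeguards_py signals)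

-- ===== LEMMAS AND PROOFS =====

-- membership in B's folded set: seed membership or some signal triggers x
lemma contains_fold_update (signals : List String) (acc : PySem.Set String) (x : String) :
    (signals.foldl (fun a sig => PySem.Set.update a (pvTriggers sig)) acc).contains x
      = (acc.contains x || signals.any (fun sig => (pvTriggers sig).contains x)) := by
  induction signals generalizing acc with
  | nil => simp
  | cons s t ih => rw [List.foldl_cons, ih, List.any_cons]; simp [pysem, Bool.or_assoc]

-- '∃ s ∈ signals, s ∈ gl' read from either side
lemma any_contains_swap (signals gl : List String) :
    signals.any (fun s => gl.contains s) = gl.any (fun g => signals.contains g) := by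
  rw [Bool.eq_iff_iff]
  simp only [List.any_eq_true, List.contains_eq_mem, decide_eq_true_eq]
  exact ⟨fun ⟨a, h1, h2⟩ => ⟨a, h2, h1⟩, fun ⟨a, h1, h2⟩ => ⟨a, h2, h1⟩⟩

-- the trigger table inverts A's three any() groups, one lemma per conditional safeguard
lemma trig_ecs (s : String) :
    (pvTriggers s).contains "expand_contract_steps"
      = ["schema_change", "column_rename", "foreign_key", "constraint", "data_migration"].contains s := by
  unfold pvTriggers; split_ifs with h1 h2 h3 h4 h5 h6 h7 h8 <;> simp_all

lemma trig_bp (s : String) :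
    (pvTriggers s).contains "backfill_plan"
      = ["backfill", "data_migration", "column_rename"].contains s := by
  unfold pvTriggers; split_ifs with h1 h2 h3 h4 h5 h6 h7 h8 <;> simp_all

lemma trig_lt (s : String) :
    (pvTriggers s).contains "lock_timeout"
      = ["schema_change", "table_creation", "index_creation", "foreign_key", "constraint"].contains s := by
  unfold pvTriggers; split_ifs with h1 h2 h3 h4 h5 h6 h7 h8 <;> simp_all

lemma trig_none (s x : String)
    (hx : x ∈ (["backwards_compatible_rollout", "rollback_strategy", "migration_test",
                "production_volume_check", "monitoring"] : List String)) :
    (pvTriggers s).contains x = false := by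
  fin_cases hx <;> (unfold pvTriggers; split_ifs <;> simp_all)

lemma anyB_ecs (signals : List String) :
    (signals.any fun sig => (pvTriggers sig).contains "expand_contract_steps")
      = (["schema_change", "column_rename", "foreign_key", "constraint", "data_migration"] : List String).any (fun g => signals.contains g) := by
  rw [show (fun sig => (pvTriggers sig).contains "expand_contract_steps")
        = (fun sig => (["schema_change", "column_rename", "foreign_key", "constraint", "data_migration"] : List String).contains sig) from funext trig_ecs]
  exact any_contains_swap signals _

lemma anyB_bp (signals : List String) :
    (signals.any fun sig => (pvTriggers sig).contains "backfill_plan")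
      = (["backfill", "data_migration", "column_rename"] : List String).any (fun g => signals.contains g) := by
  rw [show (fun sig => (pvTriggers sig).contains "backfill_plan")
        = (fun sig => (["backfill", "data_migration", "column_rename"] : List String).contains sig) from funext trig_bp]
  exact any_contains_swap signals _

lemma anyB_lt (signals : List String) :
    (signals.any fun sig => (pvTriggers sig).contains "lock_timeout")
      = (["schema_change", "table_creation", "index_creation", "foreign_key", "constraint"] : List String).any (fun g => signals.contains g) := by
  rw [show (fun sig => (pvTriggers sig).contains "lock_timeout")
        = (fun sig => (["schema_change", "table_creation", "index_creation", "foreign_key", "constraint"] : List String).contains sig) from funext trig_lt]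
  exact any_contains_swap signals _

lemma any_trig_seed_false (signals : List String) (x : String)
    (hx : x ∈ (["backwards_compatible_rollout", "rollback_strategy", "migration_test",
                "production_volume_check", "monitoring"] : List String)) :
    (signals.any fun sig => (pvTriggers sig).contains x) = false := by
  rw [List.any_eq_false]
  intro s _
  simpa using trig_none s x hx

-- ===== VERDICT (by name: the statement is the Claim_ definition above) =====
theorem required_safeguards_py_spec : Claim_equal_required_safeguards_py := by
  intro signals _
  unfold Spec_required_safeguards_py required_safeguards_py required_safeguards_py_alt pvOrderedDedupe
  apply List.filter_congr
  intro x hx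
  rw [contains_fold_update]
  unfold pvSafeguardOrder at hx
  simp only [List.mem_cons, List.not_mem_nil, or_false] at hx
  rcases hx with rfl | rfl | rfl | rfl | rfl | rfl | rfl | rfl
  · -- backwards_compatible_rollout (unconditional)
    rw [any_trig_seed_false signals "backwards_compatible_rollout" (by decide)]
    split_ifs <;> decide
  · -- expand_contract_steps
    rw [anyB_ecs]
    rcases Bool.eq_false_or_eq_true ((["schema_change", "column_rename", "foreign_key", "constraint", "data_migration"] : List String).any fun signal => signals.contains signal) with h1 | h1 <;>
    rcases Bool.eq_false_or_eq_true ((["backfill", "data_migration", "column_rename"] : List String).any fun signal => signals.contains signal) with h2 | h2 <;>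
    rcases Bool.eq_false_or_eq_true ((["schema_change", "table_creation", "index_creation", "foreign_key", "constraint"] : List String).any fun signal => signals.contains signal) with h3 | h3 <;>
    rw [h1, h2, h3] <;> decide
  · -- backfill_plan
    rw [anyB_bp]
    rcases Bool.eq_false_or_eq_true ((["schema_change", "column_rename", "foreign_key", "constraint", "data_migration"] : List String).any fun signal => signals.contains signal) with h1 | h1 <;>
    rcases Bool.eq_false_or_eq_true ((["backfill", "data_migration", "column_rename"] : List String).any fun signal => signals.contains signal) with h2 | h2 <;>
    rcases Bool.eq_false_or_eq_true ((["schema_change", "table_creation", "index_creation", "foreign_key", "constraint"] : List String).any fun signal => signals.contains signal) with h3 | h3 <;>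
    rw [h1, h2, h3] <;> decide
  · -- lock_timeout
    rw [anyB_lt]
    rcases Bool.eq_false_or_eq_true ((["schema_change", "column_rename", "foreign_key", "constraint", "data_migration"] : List String).any fun signal => signals.contains signal) with h1 | h1 <;>
    rcases Bool.eq_false_or_eq_true ((["backfill", "data_migration", "column_rename"] : List String).any fun signal => signals.contains signal) with h2 | h2 <;>
    rcases Bool.eq_false_or_eq_true ((["schema_change", "table_creation", "index_creation", "foreign_key", "constraint"] : List String).any fun signal => signals.contains signal) with h3 | h3 <;>
    rw [h1, h2, h3] <;> decide
  · -- rollback_strategy (unconditional)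
    rw [any_trig_seed_false signals "rollback_strategy" (by decide)]
    split_ifs <;> decide
  · -- migration_test (unconditional)
    rw [any_trig_seed_false signals "migration_test" (by decide)]
    split_ifs <;> decide
  · -- production_volume_check (unconditional)
    rw [any_trig_seed_false signals "production_volume_check" (by decide)]
    split_ifs <;> decide
  · -- monitoring (unconditional)
    rw [any_trig_seed_false signals "monitoring" (by decide)]
    split_ifs <;> decide
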